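-- pv_equiv track=rewrite | github.com/aravinm/PyProj | Books.py | word_stems
-- ===== SOURCE A (Python) =====
-- def word_stems(words):
--     # tries to get base word so it can count plural,singulaer, noun,verb,etc forms as the same word
--     # very crude and not perfect, will cut experiences to experienc, summation to summa , will not equate christianity to christian,etc
--     word_stems = []
--     suffixes = (('ious', 'ment'), ('ies', 'ing', 'ive',), ('ed', 'es', 'ly'),'s')
--     for word in words:
--         if len(word) > 3:
--         # prvent the choping of short words like "red" to 'r'
--             for i in range(-4, 0):
--                 if word[i:] in suffixes[i]:
--                     word = word[:i]
--                     break
--         word_stems.append(word)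
--     return word_stems
-- ===== SOURCE B (Python) =====
-- _SUFFIXES = ('ious', 'ment', 'ies', 'ing', 'ive', 'ed', 'es', 'ly', 's')
--
--
-- def _strip_suffix(word):
--     # leftmost position whose entire tail is a known suffix == longest suffix
--     for p in range(len(word) + 1):
--         if word[p:] in _SUFFIXES:
--             return word[:p]
--     return word
--
--
-- def word_stems(words):
--     return [w if len(w) <= 3 else _strip_suffix(w) for w in words]
-- ===== Notes on version B (the rewrite author's own statement) =====
-- stated objective: alternative
-- what changed: A tries the four suffix lengths at fixed negative slice offsets against a nested tuple-of-tuples indexed by the offset; B scans each word's positions left-to-right and strips at the first position whose entire tail is in one flat suffix set (a leftmost-match, regex-engine-style scan), which yields the same longest-suffix strip.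
import Mathlib
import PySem

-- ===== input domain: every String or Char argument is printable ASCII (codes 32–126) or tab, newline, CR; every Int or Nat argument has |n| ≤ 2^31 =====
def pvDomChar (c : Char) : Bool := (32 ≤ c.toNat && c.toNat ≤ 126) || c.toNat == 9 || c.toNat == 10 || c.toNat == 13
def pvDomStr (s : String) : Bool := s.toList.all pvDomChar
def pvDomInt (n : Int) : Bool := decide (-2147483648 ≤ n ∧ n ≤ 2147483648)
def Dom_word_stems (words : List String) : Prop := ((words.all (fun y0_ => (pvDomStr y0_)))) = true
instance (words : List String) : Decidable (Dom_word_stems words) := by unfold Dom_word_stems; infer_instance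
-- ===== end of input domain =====

-- B replaces A's offset-indexed nested suffix tuple by a single left-to-right position scan
-- over one flat suffix list (objective: alternative structure, same cost, same return values).

-- ===== PORT A =====
-- 'word[i:] in suffixes[i]' is tuple membership for i = -4..-2; for i = -1, suffixes[-1] = 's'
-- is a string, so 'in' is Python substring membership (PySem.Chars.isIn) — exact.
def pvA_inSuffixes (i : Int) (tail : List Char) : Bool :=
  if i = -4 then tail = ['i','o','u','s'] || tail = ['m','e','n','t']
  else if i = -3 then tail = ['i','e','s'] || tail = ['i','n','g'] || tail = ['i','v','e']
  else if i = -2 then tail = ['e','d'] || tail = ['e','s'] || tail = ['l','y']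
  else PySem.Chars.isIn tail ['s']

-- 'for i in range(-4, 0): if word[i:] in suffixes[i]: word = word[:i]; break'
def pvA_loop (word : List Char) : List Int → List Char
  | [] => word
  | i :: rest =>
    if pvA_inSuffixes i (PySem.List.slice word (some i) none) then
      PySem.List.slice word none (some i)
    else pvA_loop word rest

def pvA_stem (w : List Char) : List Char :=
  if PySem.List.len w > 3 then pvA_loop w (PySem.List.pyRange (-4) 0 1) else w

def word_stems (words : List String) : List String :=
  words.foldl (fun acc word => acc ++ [String.ofList (pvA_stem word.toList)]) []

-- ===== PORT B =====
def pvB_suffixes : List (List Char) :=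
  [['i','o','u','s'], ['m','e','n','t'], ['i','e','s'], ['i','n','g'], ['i','v','e'],
   ['e','d'], ['e','s'], ['l','y'], ['s']]

-- 'for p in range(len(word)+1): if word[p:] in _SUFFIXES: return word[:p]' — pre = word[:p], rest = word[p:]
def pvB_scan (pre rest : List Char) : List Char :=
  if pvB_suffixes.any (fun a => rest == a) then pre
  else match rest with
    | [] => pre
    | c :: rs => pvB_scan (pre ++ [c]) rs

def pvB_stem (w : List Char) : List Char :=
  if w.length ≤ 3 then w else pvB_scan [] w

def word_stems_alt (words : List String) : List String :=
  words.map (fun w => String.ofList (pvB_stem w.toList))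

-- ===== PRECONDITION & SPEC =====
def Spec_word_stems (words : List String) (out : List String) : Prop := out = word_stems_alt words
instance (words : List String) (out : List String) : Decidable (Spec_word_stems words out) := by unfold Spec_word_stems; infer_instance

-- ===== CLAIM (what is proved, stated in full; the proofs are below) =====
def Claim_equal_word_stems : Prop := ∀ (words : List String), Dom_word_stems words → Spec_word_stems words (word_stems words)

-- ===== LEMMAS AND PROOFS =====

-- B's membership test fails at any position whose tail is longer than every suffix, so the scan steps on.
theorem pv_scan_step (pre : List Char) (c : Char) (rs : List Char) (h : 4 ≤ rs.length) :
    pvB_scan pre (c :: rs) = pvB_scan (pre ++ [c]) rs := by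
  have hfalse : pvB_suffixes.any (fun a => c :: rs == a) = false := by
    apply List.any_eq_false.mpr
    intro a ha
    simp only [beq_iff_eq]
    intro heq
    have hl : (c :: rs).length = a.length := congrArg List.length heq
    simp only [List.length_cons] at hl
    fin_cases ha <;> simp only [List.length_cons, List.length_nil] at hl <;> omega
  rw [pvB_scan, hfalse]
  simp

-- Hence B's scan jumps straight to the last four characters.
theorem pv_scan_shift (w : List Char) (pre : List Char) (h : 4 ≤ w.length) :
    pvB_scan pre w = pvB_scan (pre ++ w.take (w.length - 4)) (w.drop (w.length - 4)) := by
  induction w generalizing pre with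
  | nil => simp at h
  | cons c rs ih =>
    by_cases h4 : rs.length ≤ 3
    · have h0 : (c :: rs).length - 4 = 0 := by simp; omega
      rw [h0]
      simp
    · have hrs : 4 ≤ rs.length := by omega
      have hl : (c :: rs).length - 4 = (rs.length - 4) + 1 := by simp; omega
      rw [pv_scan_step pre c rs hrs, ih (pre ++ [c]) hrs, hl]
      simp

-- A's 'word[-1:] in "s"' (substring test on a one-char slice) is just 'last char = s'.
theorem pv_isIn_single (d : Char) : PySem.Chars.isIn [d] ['s'] = decide (d = 's') := by
  by_cases hd : d = 's'
  · subst hd; decide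
  · simp [hd]
    rw [PySem.Chars.isIn_eq_false_iff]
    intro hinf
    exact hd (by simpa using hinf.subset (List.mem_singleton_self d))

-- On the last four characters both programs compute the same nested-condition result.
theorem pv_core (pre : List Char) (a b c d : Char) :
    pvA_loop (pre ++ [a,b,c,d]) [-4,-3,-2,-1] = pvB_scan pre [a,b,c,d] := by
  have h4 : (pre ++ [a,b,c,d]).length = pre.length + 4 := by simp
  have s4 : PySem.List.slice (pre ++ [a,b,c,d]) (some (-4)) none = [a,b,c,d] := by
    rw [PySem.List.slice_from_neg_ofNat _ 4 (by omega), h4, show pre.length + 4 - 4 = pre.length + 0 from by omega]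
    simpa using List.drop_length_add_append 0
  have t4 : PySem.List.slice (pre ++ [a,b,c,d]) none (some (-4)) = pre := by
    rw [PySem.List.slice_to_neg_ofNat _ 4 (by omega), h4, show pre.length + 4 - 4 = pre.length + 0 from by omega]
    simpa using List.take_length_add_append 0
  have s3 : PySem.List.slice (pre ++ [a,b,c,d]) (some (-3)) none = [b,c,d] := by
    rw [PySem.List.slice_from_neg_ofNat _ 3 (by omega), h4, show pre.length + 4 - 3 = pre.length + 1 from by omega]
    simpa using List.drop_length_add_append 1
  have t3 : PySem.List.slice (pre ++ [a,b,c,d]) none (some (-3)) = pre ++ [a] := by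
    rw [PySem.List.slice_to_neg_ofNat _ 3 (by omega), h4, show pre.length + 4 - 3 = pre.length + 1 from by omega]
    simpa using List.take_length_add_append 1
  have s2 : PySem.List.slice (pre ++ [a,b,c,d]) (some (-2)) none = [c,d] := by
    rw [PySem.List.slice_from_neg_ofNat _ 2 (by omega), h4, show pre.length + 4 - 2 = pre.length + 2 from by omega]
    simpa using List.drop_length_add_append 2
  have t2 : PySem.List.slice (pre ++ [a,b,c,d]) none (some (-2)) = pre ++ [a,b] := by
    rw [PySem.List.slice_to_neg_ofNat _ 2 (by omega), h4, show pre.length + 4 - 2 = pre.length + 2 from by omega]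
    simpa using List.take_length_add_append 2
  have s1 : PySem.List.slice (pre ++ [a,b,c,d]) (some (-1)) none = [d] := by
    rw [PySem.List.slice_from_neg_one, h4, show pre.length + 4 - 1 = pre.length + 3 from by omega]
    simpa using List.drop_length_add_append 3
  have t1 : PySem.List.slice (pre ++ [a,b,c,d]) none (some (-1)) = pre ++ [a,b,c] := by
    rw [PySem.List.slice_to_neg_one, List.dropLast_eq_take, h4, show pre.length + 4 - 1 = pre.length + 3 from by omega]
    simpa using List.take_length_add_append 3
  simp only [pvA_loop, pvA_inSuffixes, s4, t4, s3, t3, s2, t2, s1, t1, pv_isIn_single]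
  simp only [pvB_scan, pvB_suffixes]
  norm_num
  simp only [or_assoc]

theorem pv_len4_decomp (l : List Char) (h : l.length = 4) : ∃ a b c d, l = [a,b,c,d] := by
  rcases l with _|⟨a,l⟩; · simp at h
  rcases l with _|⟨b,l⟩; · simp at h
  rcases l with _|⟨c,l⟩; · simp at h
  rcases l with _|⟨d,l⟩; · simp at h
  rcases l with _|⟨e,l⟩
  · exact ⟨a,b,c,d,rfl⟩
  · simp at h

theorem pv_stem_eq (w : List Char) : pvA_stem w = pvB_stem w := by
  rw [pvA_stem, pvB_stem, PySem.List.len_eq]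
  by_cases h : w.length ≤ 3
  · rw [if_neg (by omega), if_pos h]
  · have h4 : 4 ≤ w.length := by omega
    rw [if_pos (by omega), if_neg h]
    have hrange : PySem.List.pyRange (-4) 0 1 = [-4,-3,-2,-1] := by decide
    rw [hrange]
    have hlen : (w.drop (w.length - 4)).length = 4 := by simp; omega
    obtain ⟨a,b,c,d,hd⟩ := pv_len4_decomp _ hlen
    have hw : w = w.take (w.length - 4) ++ [a,b,c,d] := by
      conv_lhs => rw [← List.take_append_drop (w.length - 4) w]
      rw [hd]
    rw [pv_scan_shift w [] h4, List.nil_append, hd]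
    calc pvA_loop w [-4,-3,-2,-1]
        = pvA_loop (w.take (w.length - 4) ++ [a,b,c,d]) [-4,-3,-2,-1] := by rw [← hw]
      _ = pvB_scan (w.take (w.length - 4)) [a,b,c,d] := pv_core _ a b c d

-- ===== VERDICT (by name: the statement is the Claim_ definition above) =====
theorem word_stems_spec : Claim_equal_word_stems := by
  intro words _
  unfold Spec_word_stems word_stems word_stems_alt
  rw [PySem.List.foldl_append_singleton_eq_map]
  exact List.map_congr_left (fun w _ => by rw [pv_stem_eq])
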